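-- pv_equiv track=rewrite | github.com/asaffulks/TorahWordByWord | scripts/word_by_word_audit.py | words_match
-- ===== SOURCE A (Python) =====
-- SYNONYMS = {}
--
-- def words_match(our_eng, reference):
--     """Check if our English gloss matches a reference gloss (ETCBC or translation word)."""
--     if not our_eng or not reference:
--         return False
--
--     our = our_eng.lower().replace('·', ' ').replace('-', ' ').strip()
--     ref = reference.lower().replace('·', ' ').replace('-', ' ').strip()
--
--     # Direct match
--     if our == ref:
--         return True
--
--     # One contains the other
--     if our in ref or ref in our:
--         return True
--
--     # Any word overlap
--     our_words = set(our.split())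
--     ref_words = set(ref.split())
--
--     # Remove function words
--     skip = {'the','a','an','of','to','in','for','and','or','is','was','with','from','by','on','at','it','he','she','they','his','her','their','its','my','your','our','not','no','this','that','these','those'}
--     our_content = our_words - skip
--     ref_content = ref_words - skip
--
--     if our_content & ref_content:
--         return True
--
--     # Synonym match
--     for ow in our_content:
--         for rw in ref_content:
--             ow_group = SYNONYMS.get(ow, {ow})
--             if rw in ow_group:
--                 return True
--             rw_group = SYNONYMS.get(rw, {rw})
--             if ow in rw_group:
--                 return True
--
--     # Stem match (first 4 chars)
--     for ow in our_content:
--         for rw in ref_content: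
--             if len(ow) >= 4 and len(rw) >= 4 and ow[:4] == rw[:4]:
--                 return True
--
--     return False
-- ===== SOURCE B (Python) =====
-- SKIP = frozenset({'the','a','an','of','to','in','for','and','or','is','was','with','from','by','on','at','it','he','she','they','his','her','their','its','my','your','our','not','no','this','that','these','those'})
--
--
-- def words_match(our_eng, reference):
--     """Check if our English gloss matches a reference gloss (ETCBC or translation word)."""
--     if not our_eng or not reference:
--         return False
--
--     our = our_eng.lower().replace('·', ' ').replace('-', ' ').strip()
--     ref = reference.lower().replace('·', ' ').replace('-', ' ').strip()
--
--     # Containment subsumes direct equality.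
--     if our in ref or ref in our:
--         return True
--
--     # One index of our content words and their 4-char stems; a single scan of
--     # the reference words then decides both the word-overlap and the stem test.
--     # (The original's synonym loop is dead code: SYNONYMS is the empty dict, so
--     # it could only rediscover an overlap already caught here.)
--     keys = set()
--     for w in our.split():
--         if w not in SKIP:
--             keys.add(w)
--             if len(w) >= 4:
--                 keys.add(w[:4])
--     return any(w not in SKIP and (w in keys or (len(w) >= 4 and w[:4] in keys))
--                for w in ref.split())
-- ===== Notes on version B (the rewrite author's own statement) =====
-- stated objective: simpler
-- what changed: B drops A's dead synonym nested loop (SYNONYMS is the empty dict, so it could only rediscover the word overlap already caught) and the separate equality check (subsumed by containment), and merges A's word-overlap intersection and nested stem scan into one index of our content words and their 4-char stems built in a single pass, decided by a single scan over the reference words.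
import Mathlib
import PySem

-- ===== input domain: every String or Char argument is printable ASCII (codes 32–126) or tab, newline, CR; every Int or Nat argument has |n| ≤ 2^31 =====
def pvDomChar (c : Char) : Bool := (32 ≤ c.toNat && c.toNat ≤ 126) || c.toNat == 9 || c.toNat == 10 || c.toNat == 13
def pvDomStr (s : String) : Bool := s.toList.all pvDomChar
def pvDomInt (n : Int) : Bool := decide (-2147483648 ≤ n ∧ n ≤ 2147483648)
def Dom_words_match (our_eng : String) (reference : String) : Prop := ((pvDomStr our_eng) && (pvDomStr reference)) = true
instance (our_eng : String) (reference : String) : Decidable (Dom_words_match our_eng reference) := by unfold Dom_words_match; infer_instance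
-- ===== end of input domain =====

-- B ('simpler'): drops A's dead synonym loop (SYNONYMS = {}) and its separate equality and
-- word-overlap checks, replacing the two nested content scans by ONE index of our words and
-- their 4-char stems built in a single pass, decided by a single scan over the reference words.

-- ===== PORT A =====
-- SYNONYMS = {}
def pvSYNONYMS : PySem.Dict String (PySem.Set String) := PySem.Dict.empty

def pvSkip : PySem.Set String := PySem.Set.ofList ["the","a","an","of","to","in","for","and","or","is","was","with","from","by","on","at","it","he","she","they","his","her","their","its","my","your","our","not","no","this","that","these","those"]

def words_match (our_eng : String) (reference : String) : Bool :=
  if our_eng == "" || reference == "" then false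
  else
    let our := PySem.Str.strip (PySem.Str.replace (PySem.Str.replace (PySem.Str.lower our_eng) "·" " ") "-" " ")
    let ref := PySem.Str.strip (PySem.Str.replace (PySem.Str.replace (PySem.Str.lower reference) "·" " ") "-" " ")
    if our == ref then true
    else if PySem.Str.isIn our ref || PySem.Str.isIn ref our then true
    else
      let our_words := PySem.Set.ofList (PySem.Str.split₀ our)
      let ref_words := PySem.Set.ofList (PySem.Str.split₀ ref)
      let our_content := PySem.Set.diff our_words pvSkip
      let ref_content := PySem.Set.diff ref_words pvSkip
      if !(PySem.Set.inter our_content ref_content).isEmpty then true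
      -- synonym nested loop (iteration over the sets; the result is an 'any', order-independent)
      else if our_content.any (fun ow => ref_content.any (fun rw =>
          let ow_group := PySem.Dict.getD pvSYNONYMS ow (PySem.Set.ofList [ow])
          if PySem.Set.contains ow_group rw then true
          else
            let rw_group := PySem.Dict.getD pvSYNONYMS rw (PySem.Set.ofList [rw])
            PySem.Set.contains rw_group ow)) then true
      -- stem nested loop
      else our_content.any (fun ow => ref_content.any (fun rw =>
          decide (4 ≤ PySem.Str.len ow) && decide (4 ≤ PySem.Str.len rw) &&
          (PySem.Str.slice ow none (some 4) == PySem.Str.slice rw none (some 4))))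

-- ===== PORT B =====
def words_match_alt (our_eng : String) (reference : String) : Bool :=
  if our_eng == "" || reference == "" then false
  else
    let our := PySem.Str.strip (PySem.Str.replace (PySem.Str.replace (PySem.Str.lower our_eng) "·" " ") "-" " ")
    let ref := PySem.Str.strip (PySem.Str.replace (PySem.Str.replace (PySem.Str.lower reference) "·" " ") "-" " ")
    -- containment subsumes direct equality
    if PySem.Str.isIn our ref || PySem.Str.isIn ref our then true
    else
      -- one pass over our words building the index of content words and their stems
      let keys := (PySem.Str.split₀ our).foldl (fun ks w =>
        if PySem.Set.contains pvSkip w then ks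
        else
          let ks := PySem.Set.add ks w
          if decide (4 ≤ PySem.Str.len w) then PySem.Set.add ks (PySem.Str.slice w none (some 4)) else ks)
        PySem.Set.empty
      -- one scan over the reference words
      (PySem.Str.split₀ ref).any (fun w =>
        !PySem.Set.contains pvSkip w &&
          (PySem.Set.contains keys w ||
            (decide (4 ≤ PySem.Str.len w) && PySem.Set.contains keys (PySem.Str.slice w none (some 4)))))

-- ===== PRECONDITION & SPEC =====
def Spec_words_match (our_eng : String) (reference : String) (out : Bool) : Prop := out = words_match_alt our_eng reference
instance (our_eng : String) (reference : String) (out : Bool) : Decidable (Spec_words_match our_eng reference out) := by unfold Spec_words_match; infer_instance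

-- ===== CLAIM (what is proved, stated in full; the proofs are below) =====
def Claim_equal_words_match : Prop := ∀ (our_eng : String) (reference : String), Dom_words_match our_eng reference → Spec_words_match our_eng reference (words_match our_eng reference)

-- ===== LEMMAS AND PROOFS =====

-- A string is a substring of itself ('our in ref' when our = ref).
lemma isIn_self (cs : List Char) : PySem.Chars.isIn cs cs = true := by
  simp [PySem.Chars.isIn_iff_infix]

-- With the content intersection empty, the synonym loop over the empty SYNONYMS dict can never fire.
lemma syn_any_false (oc rc : List String) (h : (PySem.Set.inter oc rc).isEmpty = true) :
    oc.any (fun ow => rc.any (fun rw =>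
      let ow_group := PySem.Dict.getD pvSYNONYMS ow (PySem.Set.ofList [ow])
      if PySem.Set.contains ow_group rw then true
      else
        let rw_group := PySem.Dict.getD pvSYNONYMS rw (PySem.Set.ofList [rw])
        PySem.Set.contains rw_group ow)) = false := by
  simp only [List.isEmpty_iff] at h
  rw [List.any_eq_false]
  intro ow how
  rw [Bool.not_eq_true, List.any_eq_false]
  intro rw hrw
  have hni : rw ≠ ow := by
    intro he
    have : rw ∈ PySem.Set.inter oc rc := by
      simp [pysem]; exact ⟨he ▸ how, hrw⟩
    simp [h] at this
  simp [pvSYNONYMS, pysem, PySem.Set.contains, hni, Ne.symm hni]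

-- The 4-char stem of a string of length ≥ 4: its length is 4 and it is its own stem.
lemma stem_len (w : String) (h : 4 ≤ PySem.Str.len w) :
    PySem.Str.len (PySem.Str.slice w none (some 4)) = 4 := by
  simp only [pysem] at *
  rw [PySem.List.slice_to _ (by norm_num : (0:Int) ≤ 4)]
  simp only [List.length_take]
  omega

lemma stem_idem (w : String) (_h : 4 ≤ PySem.Str.len w) :
    PySem.Str.slice (PySem.Str.slice w none (some 4)) none (some 4) = PySem.Str.slice w none (some 4) := by
  apply String.toList_inj.mp
  simp only [pysem]
  rw [PySem.List.slice_to _ (by norm_num : (0:Int) ≤ 4), PySem.List.slice_to _ (by norm_num : (0:Int) ≤ 4)]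
  simp [List.take_take]

-- Membership in B's index (stated in simp-normal form): exactly our content words and
-- the stems of those of length ≥ 4.
lemma mem_keys_iff (ows : List String) (acc : PySem.Set String) (x : String) :
    x ∈ ows.foldl (fun ks w =>
        if w ∈ pvSkip then ks
        else if 4 ≤ PySem.Str.len w then (PySem.Set.add ks w).add (PySem.Str.slice w none (some 4))
        else PySem.Set.add ks w)
      acc
    ↔ x ∈ acc ∨ ∃ w ∈ ows, w ∉ pvSkip ∧
        (x = w ∨ (4 ≤ PySem.Str.len w ∧ x = PySem.Str.slice w none (some 4))) := by
  induction ows generalizing acc with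
  | nil => simp
  | cons o os ih =>
    simp only [List.foldl_cons]
    by_cases hsk : o ∈ pvSkip
    · rw [if_pos hsk, ih]
      constructor
      · rintro (h | ⟨w, hw, hc, hx⟩)
        · exact Or.inl h
        · exact Or.inr ⟨w, List.mem_cons_of_mem _ hw, hc, hx⟩
      · rintro (h | ⟨w, hw, hc, hx⟩)
        · exact Or.inl h
        · rcases List.mem_cons.mp hw with rfl | hw'
          · exact absurd hsk hc
          · exact Or.inr ⟨w, hw', hc, hx⟩
    · rw [if_neg hsk]
      by_cases hl : (4:Int) ≤ PySem.Str.len o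
      · rw [if_pos hl, ih]
        constructor
        · rintro (h | ⟨w, hw, hc, hx⟩)
          · rcases (PySem.Set.mem_add _ _ _).mp h with h' | h'
            · rcases (PySem.Set.mem_add _ _ _).mp h' with h'' | h''
              · exact Or.inl h''
              · exact Or.inr ⟨o, List.mem_cons_self, hsk, Or.inl h''⟩
            · exact Or.inr ⟨o, List.mem_cons_self, hsk, Or.inr ⟨hl, h'⟩⟩
          · exact Or.inr ⟨w, List.mem_cons_of_mem _ hw, hc, hx⟩
        · rintro (h | ⟨w, hw, hc, hx⟩)
          · exact Or.inl ((PySem.Set.mem_add _ _ _).mpr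
              (Or.inl ((PySem.Set.mem_add _ _ _).mpr (Or.inl h))))
          · rcases List.mem_cons.mp hw with rfl | hw'
            · rcases hx with rfl | ⟨_, rfl⟩
              · exact Or.inl ((PySem.Set.mem_add _ _ _).mpr
                  (Or.inl ((PySem.Set.mem_add _ _ _).mpr (Or.inr rfl))))
              · exact Or.inl ((PySem.Set.mem_add _ _ _).mpr (Or.inr rfl))
            · exact Or.inr ⟨w, hw', hc, hx⟩
      · rw [if_neg hl, ih]
        constructor
        · rintro (h | ⟨w, hw, hc, hx⟩)
          · rcases (PySem.Set.mem_add _ _ _).mp h with h' | h'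
            · exact Or.inl h'
            · exact Or.inr ⟨o, List.mem_cons_self, hsk, Or.inl h'⟩
          · exact Or.inr ⟨w, List.mem_cons_of_mem _ hw, hc, hx⟩
        · rintro (h | ⟨w, hw, hc, hx⟩)
          · exact Or.inl ((PySem.Set.mem_add _ _ _).mpr (Or.inl h))
          · rcases List.mem_cons.mp hw with rfl | hw'
            · rcases hx with rfl | ⟨h4, _⟩
              · exact Or.inl ((PySem.Set.mem_add _ _ _).mpr (Or.inr rfl))
              · exact absurd h4 hl
            · exact Or.inr ⟨w, hw', hc, hx⟩

-- The heart: A's word-overlap-or-stem decision equals B's single scan against the index.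
lemma main_eq (ows rws : List String) :
    ((!(PySem.Set.inter (PySem.Set.diff (PySem.Set.ofList ows) pvSkip) (PySem.Set.diff (PySem.Set.ofList rws) pvSkip)).isEmpty) ||
      (PySem.Set.diff (PySem.Set.ofList ows) pvSkip).any (fun ow => (PySem.Set.diff (PySem.Set.ofList rws) pvSkip).any (fun rw =>
        decide (4 ≤ PySem.Str.len ow) && decide (4 ≤ PySem.Str.len rw) &&
        (PySem.Str.slice ow none (some 4) == PySem.Str.slice rw none (some 4)))))
    = rws.any (fun w =>
        !PySem.Set.contains pvSkip w &&
          (PySem.Set.contains ((ows.foldl (fun ks w =>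
              if PySem.Set.contains pvSkip w then ks
              else
                let ks := PySem.Set.add ks w
                if decide (4 ≤ PySem.Str.len w) then PySem.Set.add ks (PySem.Str.slice w none (some 4)) else ks)
            PySem.Set.empty)) w ||
            (decide (4 ≤ PySem.Str.len w) && PySem.Set.contains ((ows.foldl (fun ks w =>
                if PySem.Set.contains pvSkip w then ks
                else
                  let ks := PySem.Set.add ks w
                  if decide (4 ≤ PySem.Str.len w) then PySem.Set.add ks (PySem.Str.slice w none (some 4)) else ks)
              PySem.Set.empty)) (PySem.Str.slice w none (some 4))))) := by
  rw [Bool.eq_iff_iff]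
  simp only [Bool.or_eq_true, Bool.and_eq_true, Bool.not_eq_true', List.any_eq_true,
    decide_eq_true_eq, beq_iff_eq, PySem.Set.contains_eq_decide, decide_eq_false_iff_not,
    PySem.Set.mem_inter, PySem.Set.mem_diff, PySem.Set.mem_ofList,
    List.isEmpty_eq_false_iff_exists_mem, mem_keys_iff, PySem.Set.empty,
    List.not_mem_nil, false_or]
  constructor
  · rintro (⟨x, ⟨hxo, hxs⟩, hxr, _⟩ | ⟨ow, ⟨howo, hows⟩, rw, ⟨hrwo, hrws⟩, ⟨hlo, hlr⟩, hpre⟩)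
    · exact ⟨x, hxr, hxs, Or.inl ⟨x, hxo, hxs, Or.inl rfl⟩⟩
    · exact ⟨rw, hrwo, hrws, Or.inr ⟨hlr, ⟨ow, howo, hows, Or.inr ⟨hlo, hpre.symm⟩⟩⟩⟩
  · rintro ⟨w, hwr, hws, hcase⟩
    rcases hcase with ⟨ow, howo, hows, rfl | ⟨hlo, rfl⟩⟩ | ⟨hlw, ⟨ow, howo, hows, hpre | ⟨hlo, hpre⟩⟩⟩
    · exact Or.inl ⟨w, ⟨howo, hows⟩, hwr, hws⟩
    · -- w is the stem of ow: stem match, len w = 4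
      refine Or.inr ⟨ow, ⟨howo, hows⟩, _, ⟨hwr, hws⟩, ⟨hlo, (stem_len ow hlo).ge⟩, (stem_idem ow hlo).symm⟩
    · -- w[:4] equals ow itself, so len ow = 4 and ow is its own stem
      have hlo : (4:Int) ≤ PySem.Str.len ow := by rw [← hpre, stem_len w hlw]
      refine Or.inr ⟨ow, ⟨howo, hows⟩, _, ⟨hwr, hws⟩, ⟨hlo, hlw⟩, ?_⟩
      rw [← hpre, stem_idem w hlw]
    · exact Or.inr ⟨ow, ⟨howo, hows⟩, _, ⟨hwr, hws⟩, ⟨hlo, hlw⟩, hpre.symm⟩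

-- ===== VERDICT (by name: the statement is the Claim_ definition above) =====
theorem words_match_spec : Claim_equal_words_match := by
  intro our_eng reference _
  unfold Spec_words_match words_match words_match_alt
  dsimp only
  split
  · rfl
  · split
    · -- our == ref: B's containment check fires
      rename_i heq
      rw [beq_iff_eq] at heq
      rw [heq, if_pos (by simp [isIn_self])]
    · split
      · rfl
      · split
        · rename_i hint
          rw [Bool.not_eq_true'] at hint
          rw [← main_eq]
          simp [hint]
        · rename_i hint
          rw [Bool.not_eq_true, Bool.not_eq_false'] at hint
          rw [syn_any_false _ _ hint, if_neg (by simp), ← main_eq]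
          simp [hint]
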